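-- pv_equiv track=rewrite | github.com/maqiuping59/arithmetic-coding | code9.py | bianma
-- ===== SOURCE A (Python) =====
-- def bin_jinwei(input_bin=[]):
--     for i in range(len(input_bin)):
--         if input_bin[len(input_bin) - 1 - i] == 0:
--             input_bin[len(input_bin) - 1 - i] = 1
--             break
--         else:
--             input_bin[len(input_bin) - i - 1] = 0
--     return input_bin
--
-- def bianma(bin_pos, pre_length=30):
--     pre_result = []
--     if len(bin_pos) == pre_length:
--         pre_result = bin_pos
--     elif len(bin_pos) >= pre_length:
--         '''
--         如果N小于二进制概率位数，则将二进制小数的第N位进1，然后截取N位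
--         '''
--         pre_result = bin_pos[:pre_length]
--         pre_result = bin_jinwei(pre_result)
--
--     else:
--         '''
--         如果N大于二进制概率位数，则将二进制小数位后面补零至N位，然后截取N位
--         '''
--         for i in range(pre_length-len(bin_pos)):
--             bin_pos.append(0)
--             pre_result = bin_pos
--     return pre_result
-- ===== SOURCE B (Python) =====
-- def bianma(bin_pos, pre_length=30):
--     n = len(bin_pos)
--     if n == pre_length:
--         return bin_pos
--     if n < pre_length:
--         bin_pos.extend([0] * (pre_length - n))
--         return bin_pos
--     pre = bin_pos[:pre_length]
--     rev = pre[::-1]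
--     if 0 in rev:
--         k = rev.index(0)
--         return pre[:len(pre) - 1 - k] + [1] + [0] * k
--     return [0] * len(pre)
-- ===== Notes on version B (the rewrite author's own statement) =====
-- stated objective: simpler
-- what changed: A's helper bin_jinwei propagates the carry by mutating bits one at a time in a loop with break; B instead locates the rightmost zero of the truncated prefix (reverse + index) and rebuilds the result in one expression as the prefix up to that position, a one, and trailing zeros, and replaces A's one-append-per-iteration padding loop by a single extend.
import Mathlib
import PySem

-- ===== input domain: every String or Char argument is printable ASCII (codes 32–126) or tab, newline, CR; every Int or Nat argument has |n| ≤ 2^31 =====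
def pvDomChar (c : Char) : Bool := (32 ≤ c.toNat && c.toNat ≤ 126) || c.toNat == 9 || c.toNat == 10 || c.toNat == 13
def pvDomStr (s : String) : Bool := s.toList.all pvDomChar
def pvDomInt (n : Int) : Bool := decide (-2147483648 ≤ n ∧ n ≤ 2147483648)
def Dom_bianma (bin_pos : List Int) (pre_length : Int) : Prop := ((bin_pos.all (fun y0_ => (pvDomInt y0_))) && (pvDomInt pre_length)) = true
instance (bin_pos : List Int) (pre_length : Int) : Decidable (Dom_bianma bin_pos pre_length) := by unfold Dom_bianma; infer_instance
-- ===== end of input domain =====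

-- B replaces A's bit-by-bit carry-propagation loop by a single rightmost-zero search with slice
-- rebuilding (objective: simpler/alternative; same O(n) cost). A mutates bin_pos in place in the
-- padding branch and returns the aliased argument; B performs the same mutation (extend); the
-- equivalence proved here is about the return value.

-- ===== PORT A =====
-- bin_jinwei: 'for i in range(len(input_bin))' with early break; index len-1-i is always in
-- range (0 ≤ len-1-i < len), so getD is exact here.
def binJinweiAux (input : List Int) (i : Nat) : Nat → List Int
  | 0 => input
  | fuel+1 =>
    let idx := input.length - 1 - i
    if input.getD idx 0 = 0 then input.set idx 1
    else binJinweiAux (input.set idx 0) (i+1) fuel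

def binJinwei (input : List Int) : List Int := binJinweiAux input 0 input.length

-- the padding for-loop: each iteration appends one 0 (pre_result aliases bin_pos)
def padLoop (l : List Int) : Nat → List Int
  | 0 => l
  | k+1 => padLoop (l ++ [0]) k

def bianma (bin_pos : List Int) (pre_length : Int) : List Int :=
  if (bin_pos.length : Int) = pre_length then bin_pos
  else if (bin_pos.length : Int) ≥ pre_length then
    binJinwei (PySem.List.slice bin_pos none (some pre_length))
  else
    padLoop bin_pos (pre_length - (bin_pos.length : Int)).toNat

-- ===== PORT B =====
def bianma_alt (bin_pos : List Int) (pre_length : Int) : List Int :=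
  if (bin_pos.length : Int) = pre_length then bin_pos
  else if (bin_pos.length : Int) < pre_length then
    bin_pos ++ List.replicate (pre_length - (bin_pos.length : Int)).toNat 0
  else
    let pre := PySem.List.slice bin_pos none (some pre_length)
    let rev := pre.reverse
    match PySem.List.index? rev 0 with
    | some k => pre.take (pre.length - 1 - k) ++ [1] ++ List.replicate k 0
    | none => List.replicate pre.length 0

-- ===== PRECONDITION & SPEC =====
def Spec_bianma (bin_pos : List Int) (pre_length : Int) (out : List Int) : Prop := out = bianma_alt bin_pos pre_length
instance (bin_pos : List Int) (pre_length : Int) (out : List Int) : Decidable (Spec_bianma bin_pos pre_length out) := by unfold Spec_bianma; infer_instance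

-- ===== CLAIM (what is proved, stated in full; the proofs are below) =====
def Claim_equal_bianma : Prop := ∀ (bin_pos : List Int) (pre_length : Int), Dom_bianma bin_pos pre_length → Spec_bianma bin_pos pre_length (bianma bin_pos pre_length)

-- ===== LEMMAS AND PROOFS =====

-- reference form of A's carry, processed from the right end (i.e. on the reversed list)
def carryRev : List Int → List Int
  | [] => []
  | x :: xs => if x = 0 then 1 :: xs else 0 :: carryRev xs

theorem padLoop_eq (k : Nat) : ∀ (l : List Int), padLoop l k = l ++ List.replicate k 0 := by
  induction k with
  | zero => intro l; simp [padLoop]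
  | succ k ih =>
    intro l
    simp [padLoop, ih (l ++ [0]), List.replicate_succ]

theorem binJinweiAux_eq (fuel : Nat) : ∀ (l : List Int) (i : Nat), l.length = i + fuel →
    binJinweiAux l i fuel = (carryRev (l.take fuel).reverse).reverse ++ l.drop fuel := by
  induction fuel with
  | zero => intro l i h; simp [binJinweiAux, carryRev]
  | succ fuel ih =>
    intro l i h
    have hfl : fuel < l.length := by omega
    have hidx : l.length - 1 - i = fuel := by omega
    have hget : l.getD fuel 0 = l[fuel] := List.getD_eq_getElem l 0 hfl
    have htake : l.take (fuel + 1) = l.take fuel ++ [l[fuel]] :=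
      List.take_succ_eq_append_getElem hfl
    simp only [binJinweiAux, hidx, hget]
    by_cases h0 : l[fuel] = (0 : Int)
    · simp only [h0, if_pos]
      rw [List.set_eq_take_cons_drop 1 hfl, htake]
      simp [carryRev, h0]
    · rw [if_neg h0]
      have hlen : (l.set fuel 0).length = (i + 1) + fuel := by simp; omega
      rw [ih (l.set fuel 0) (i + 1) hlen]
      rw [List.set_eq_take_cons_drop 0 hfl]
      have h1 : ((l.take fuel ++ 0 :: l.drop (fuel + 1)).take fuel) = l.take fuel := by
        rw [List.take_append_of_le_length (by simp [List.length_take]; omega)]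
        simp [List.take_take]
      have h2 : ((l.take fuel ++ 0 :: l.drop (fuel + 1)).drop fuel) = 0 :: l.drop (fuel + 1) := by
        rw [List.drop_append_of_le_length (by simp [List.length_take]; omega)]
        simp
      rw [h1, h2, htake]
      simp only [List.reverse_append, List.reverse_cons, List.reverse_nil, List.nil_append,
        List.cons_append, carryRev, if_neg h0]
      simp

-- B's rightmost-zero construction on the reversed list equals carryRev
theorem carryRev_index (r : List Int) :
    carryRev r = (match PySem.List.index? r 0 with
      | some k => List.replicate k 0 ++ 1 :: r.drop (k + 1)
      | none => List.replicate r.length 0) := by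
  induction r with
  | nil => simp [carryRev, PySem.List.index?]
  | cons x xs ih =>
    by_cases h0 : x = (0 : Int)
    · subst h0
      rw [PySem.List.index?_cons_self]
      simp [carryRev]
    · rw [PySem.List.index?_cons_of_ne xs h0]
      simp only [carryRev, if_neg h0]
      rw [ih]
      cases hix : PySem.List.index? xs 0 with
      | none => simp [List.replicate_succ]
      | some k => simp [List.replicate_succ]

theorem index?_lt_length {r : List Int} {k : Nat} (h : PySem.List.index? r 0 = some k) :
    k < r.length := (PySem.List.getElem_of_index?_eq_some h).1

theorem binJinwei_eq (p : List Int) :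
    binJinwei p = (match PySem.List.index? p.reverse 0 with
      | some k => p.take (p.length - 1 - k) ++ [1] ++ List.replicate k 0
      | none => List.replicate p.length 0) := by
  have h := binJinweiAux_eq p.length p 0 (by omega)
  rw [binJinwei, h]
  simp only [List.take_length, List.drop_length, List.append_nil]
  rw [carryRev_index p.reverse]
  cases hix : PySem.List.index? p.reverse 0 with
  | none => simp
  | some k =>
    have hk : k < p.length := by
      have := index?_lt_length hix; simpa using this
    simp only
    rw [List.reverse_append, List.reverse_cons, List.reverse_replicate]
    have hd : p.reverse.drop (k + 1) = (p.take (p.length - (k + 1))).reverse := by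
      rw [List.drop_reverse]
    rw [hd, List.reverse_reverse]
    have : p.length - (k + 1) = p.length - 1 - k := by omega
    rw [this]

-- ===== VERDICT (by name: the statement is the Claim_ definition above) =====
theorem bianma_spec : Claim_equal_bianma := by
  intro bin_pos pre_length _
  unfold Spec_bianma bianma bianma_alt
  by_cases h1 : (bin_pos.length : Int) = pre_length
  · simp [h1]
  · rw [if_neg h1, if_neg h1]
    by_cases h2 : (bin_pos.length : Int) ≥ pre_length
    · rw [if_pos h2, if_neg (by omega)]
      exact binJinwei_eq _
    · rw [if_neg h2, if_pos (by omega)]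
      exact padLoop_eq _ _
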